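-- pv_equiv track=rewrite | github.com/arindhimar/BluePineapple | Python Programs/19-12-25/061.py | count_substr_equal_to_len
-- ===== SOURCE A (Python) =====
-- def count_substr_equal_to_len(tempList):
--     n=len(tempList)
--     count =0
--
--     for i in range(n):
--         current_sum=0
--         for j in range(i, n):
--             current_sum+=tempList[j]
--             if current_sum==(j - i + 1):
--                 count+=1
--
--     return count
-- ===== SOURCE B (Python) =====
-- def count_substr_equal_to_len(tempList):
--     seen = {0: 1}
--     run = 0
--     cnt = 0
--     for x in tempList:
--         run += x - 1
--         c = seen.get(run, 0)
--         cnt += c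
--         seen[run] = c + 1
--     return cnt
-- ===== Notes on version B (the rewrite author's own statement) =====
-- stated objective: faster
-- what changed: Replaces the O(n^2) double loop over all subarrays by a single pass that counts zero-sum subarrays of the shifted values a[k]-1 with a prefix-sum counter dictionary.
import Mathlib
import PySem

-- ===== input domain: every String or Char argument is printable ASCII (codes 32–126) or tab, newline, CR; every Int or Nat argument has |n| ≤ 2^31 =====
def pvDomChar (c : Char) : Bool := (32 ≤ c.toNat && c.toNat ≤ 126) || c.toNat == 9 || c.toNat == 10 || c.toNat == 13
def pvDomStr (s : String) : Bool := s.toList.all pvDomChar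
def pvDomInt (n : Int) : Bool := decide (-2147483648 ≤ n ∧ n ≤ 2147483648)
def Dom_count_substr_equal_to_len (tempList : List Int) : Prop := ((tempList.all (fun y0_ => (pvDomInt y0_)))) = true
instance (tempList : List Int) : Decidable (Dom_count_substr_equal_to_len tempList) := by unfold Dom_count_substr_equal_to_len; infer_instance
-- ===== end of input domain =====

-- B replaces A's O(n^2) double loop by a single pass counting zero-sum subarrays of the
-- shifted values a[k]-1 with a prefix-sum counter dictionary (objective: faster).


-- ===== PORT A =====
def count_substr_equal_to_len (tempList : List Int) : Int :=
  let n : Int := tempList.length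
  (PySem.List.pyRange 0 n 1).foldl
    (fun count i =>
      ((PySem.List.pyRange i n 1).foldl
        (fun (st : Int × Int) j =>
          let current_sum := st.1 + PySem.List.pyGetD tempList j 0
          (current_sum, if current_sum = j - i + 1 then st.2 + 1 else st.2))
        (0, count)).2)
    0

-- ===== PORT B =====
def count_substr_equal_to_len_alt (tempList : List Int) : Int :=
  (tempList.foldl
    (fun (st : PySem.Dict Int Int × Int × Int) x =>
      let run := st.2.1 + x - 1
      let c := st.1.getD run 0
      (st.1.insert run (c + 1), run, st.2.2 + c))
    (PySem.Dict.empty.insert 0 1, 0, 0)).2.2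

-- ===== PRECONDITION & SPEC =====
def Spec_count_substr_equal_to_len (tempList : List Int) (out : Int) : Prop := out = count_substr_equal_to_len_alt tempList
instance (tempList : List Int) (out : Int) : Decidable (Spec_count_substr_equal_to_len tempList out) := by unfold Spec_count_substr_equal_to_len; infer_instance

-- ===== CLAIM (what is proved, stated in full; the proofs are below) =====
def Claim_equal_count_substr_equal_to_len : Prop := ∀ (tempList : List Int), Dom_count_substr_equal_to_len tempList → Spec_count_substr_equal_to_len tempList (count_substr_equal_to_len tempList)

-- ===== LEMMAS AND PROOFS =====

-- runs r ys = the successive values of B's running total 'run' (starting at r) over ys;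
-- equivalently the shifted prefix sums r + sum(ys[:t]) - t for t = 1..len ys.
def pvRuns (r : Int) : List Int → List Int
  | [] => []
  | x :: ys => (r + x - 1) :: pvRuns (r + x - 1) ys

-- number of (earlier, later) pairs of equal values, the later one in vs, the earlier in H ++ (prefix of vs)
def pvPcount (H : List Int) : List Int → Int
  | [] => 0
  | v :: vs => (H.count v : Int) + pvPcount (H ++ [v]) vs

-- number of equal pairs counted by their FIRST element (A's grouping)
def pvFpairs : List Int → Int
  | [] => 0
  | v :: vs => (vs.count v : Int) + pvFpairs vs

-- the value A's outer loop accumulates, suffix by suffix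
def pvAsum : List Int → Int
  | [] => 0
  | x :: xs => ((pvRuns 0 (x :: xs)).count 0 : Int) + pvAsum xs

lemma pvRuns_shift (r : Int) : ∀ (ys : List Int) (s : Int),
    pvRuns (r + s) ys = (pvRuns s ys).map (· + r) := by
  intro ys
  induction ys with
  | nil => intro s; simp [pvRuns]
  | cons x t ih =>
      intro s
      simp only [pvRuns, List.map_cons]
      rw [show r + s + x - 1 = r + (s + x - 1) by ring, ih (s + x - 1),
        show r + (s + x - 1) = s + x - 1 + r by ring]

lemma count_map_add (l : List Int) (r c : Int) :
    (l.map (· + r)).count c = l.count (c - r) := by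
  induction l with
  | nil => simp
  | cons x t ih =>
      simp only [List.map_cons, List.count_cons, ih]
      have : (x + r == c) = (x == c - r) := by
        by_cases h : x = c - r
        · simp [h, show c - r + r = c by ring]
        · have h2 : ¬ x + r = c := by omega
          simp [h, h2]
      rw [this]

lemma pvFpairs_map_add (r : Int) : ∀ (l : List Int),
    pvFpairs (l.map (· + r)) = pvFpairs l := by
  intro l
  induction l with
  | nil => rfl
  | cons x t ih =>
      simp only [List.map_cons, pvFpairs, ih, count_map_add]
      have : x + r - r = x := by ring
      rw [this]

-- A's value, grouped by first element, equals pvFpairs of the full prefix list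
lemma pvAsum_eq_fpairs : ∀ (xs : List Int), pvAsum xs = pvFpairs (0 :: pvRuns 0 xs) := by
  intro xs
  induction xs with
  | nil => rfl
  | cons x t ih =>
      have hshift : pvRuns 0 (x :: t) = (x - 1) :: (pvRuns 0 t).map (· + (x - 1)) := by
        show ((0 : Int) + x - 1) :: pvRuns (0 + x - 1) t = _
        rw [show (0 : Int) + x - 1 = (x - 1) + 0 by ring, pvRuns_shift]
        simp
      have key : pvFpairs (pvRuns 0 (x :: t)) = ((pvRuns 0 t).count 0 : Int) + pvFpairs (pvRuns 0 t) := by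
        rw [hshift]
        show (((pvRuns 0 t).map (· + (x - 1))).count (x - 1) : Int)
            + pvFpairs ((pvRuns 0 t).map (· + (x - 1))) = _
        rw [count_map_add, pvFpairs_map_add]
        have : x - 1 - (x - 1) = 0 := by ring
        rw [this]
      show ((pvRuns 0 (x :: t)).count 0 : Int) + pvAsum t = pvFpairs (0 :: pvRuns 0 (x :: t))
      rw [ih]
      show _ = ((pvRuns 0 (x :: t)).count 0 : Int) + pvFpairs (pvRuns 0 (x :: t))
      rw [key]
      rfl

lemma sum_count_cons (v : Int) (vs : List Int) : ∀ (H : List Int),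
    (H.map (fun h => (((v :: vs).count h : Nat) : Int))).sum
      = (H.map (fun h => ((vs.count h : Nat) : Int))).sum + ((H.count v : Nat) : Int) := by
  intro H
  induction H with
  | nil => simp
  | cons k ks ihk =>
      simp only [List.map_cons, List.sum_cons]
      rw [ihk]
      simp only [List.count_cons]
      by_cases h : v = k
      · subst h
        simp only [BEq.rfl, if_true]
        push_cast
        ring
      · have h1 : (v == k) = false := by simp [h]
        have h2 : (k == v) = false := by simp [Ne.symm h]
        simp only [h1, h2, Bool.false_eq_true, if_false]
        push_cast
        ring

lemma pvPcount_split : ∀ (L H : List Int),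
    pvPcount H L = (H.map (fun h => (L.count h : Int))).sum + pvPcount [] L := by
  intro L
  induction L with
  | nil => intro H; simp [pvPcount]
  | cons v vs ih =>
      intro H
      show (H.count v : Int) + pvPcount (H ++ [v]) vs
          = (H.map (fun h => ((v :: vs).count h : Int))).sum + pvPcount [] (v :: vs)
      rw [ih (H ++ [v]),
        show pvPcount [] (v :: vs) = (([] : List Int).count v : Int) + pvPcount [v] vs from rfl,
        ih [v], sum_count_cons]
      simp only [List.map_append, List.sum_append, List.map_cons, List.map_nil,
        List.sum_cons, List.sum_nil, List.count_nil]
      push_cast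
      ring

-- counting pairs by the second element equals counting them by the first
lemma pvPcount_eq_fpairs : ∀ (L : List Int), pvPcount [] L = pvFpairs L := by
  intro L
  induction L with
  | nil => rfl
  | cons v vs ih =>
      show (([] : List Int).count v : Int) + pvPcount [v] vs = (vs.count v : Int) + pvFpairs vs
      rw [pvPcount_split vs [v], ih]
      simp

-- ===== B side: the dictionary fold computes pvPcount =====
lemma alt_fold_invariant : ∀ (ys : List Int) (d : PySem.Dict Int Int) (run cnt : Int) (H : List Int),
    (∀ v : Int, d.getD v 0 = (H.count v : Int)) →
    ((ys.foldl
      (fun (st : PySem.Dict Int Int × Int × Int) x =>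
        let r := st.2.1 + x - 1
        let c := st.1.getD r 0
        (st.1.insert r (c + 1), r, st.2.2 + c))
      (d, run, cnt)).2.2 : Int) = cnt + pvPcount H (pvRuns run ys) := by
  intro ys
  induction ys with
  | nil => intro d run cnt H _; simp [pvPcount, pvRuns]
  | cons x t ih =>
      intro d run cnt H hd
      simp only [List.foldl_cons]
      have hstep : ∀ v : Int, (d.insert (run + x - 1) (d.getD (run + x - 1) 0 + 1)).getD v 0
          = ((H ++ [run + x - 1]).count v : Int) := by
        intro v
        rw [PySem.Dict.getD_insert]
        by_cases h : v = run + x - 1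
        · subst h
          simp [hd, List.count_append]
        · simp [h, hd, List.count_append, Ne.symm h]
      have := ih (d.insert (run + x - 1) (d.getD (run + x - 1) 0 + 1)) (run + x - 1)
        (cnt + d.getD (run + x - 1) 0) (H ++ [run + x - 1]) hstep
      simp only at this ⊢
      rw [this, hd]
      simp only [pvRuns, pvPcount]
      ring

lemma alt_eq_pcount (xs : List Int) :
    count_substr_equal_to_len_alt xs = pvPcount [0] (pvRuns 0 xs) := by
  unfold count_substr_equal_to_len_alt
  have h0 : ∀ v : Int, (PySem.Dict.empty.insert (0:Int) (1:Int)).getD v 0 = (([0] : List Int).count v : Int) := by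
    intro v
    rw [PySem.Dict.getD_insert]
    by_cases h : v = 0
    · subst h; simp
    · simp [h, Ne.symm h, PySem.Dict.empty, PySem.Dict.getD, PySem.Dict.get?]
  have := alt_fold_invariant xs (PySem.Dict.empty.insert 0 1) 0 0 [0] h0
  simpa using this

-- ===== A side: the double loop computes pvAsum =====

-- inner loop of A, started at index a with accumulator (cs, count)
lemma a_inner (xs : List Int) : ∀ (k : Nat) (a : Nat), xs.length - a = k → a ≤ xs.length →
    ∀ (i cs count : Int),
    ((PySem.List.pyRange (a : Int) (xs.length : Int) 1).foldl
      (fun (st : Int × Int) j =>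
        let current_sum := st.1 + PySem.List.pyGetD xs j 0
        (current_sum, if current_sum = j - (i : Int) + 1 then st.2 + 1 else st.2))
      (cs, count)).2
      = count + ((pvRuns (cs - ((a : Int) - i)) (xs.drop a)).count 0 : Int) := by
  intro k
  induction k with
  | zero =>
      intro a hk ha i cs count
      have hae : a = xs.length := by omega
      subst hae
      rw [PySem.List.pyRange_one_eq_nil (by omega)]
      simp [pvRuns, List.drop_length]
  | succ m ih =>
      intro a hk ha i cs count
      have halt : a < xs.length := by omega
      rw [PySem.List.pyRange_one_cons (by exact_mod_cast halt)]
      simp only [List.foldl_cons]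
      have hget : PySem.List.pyGetD xs (a : Int) 0 = xs[a] := by
        rw [PySem.List.pyGetD_natCast]
        exact List.getD_eq_getElem xs 0 halt
      have hdrop : xs.drop a = xs[a] :: xs.drop (a + 1) := List.drop_eq_getElem_cons halt
      have hrec := ih (a + 1) (by omega) (by omega) i (cs + xs[a]) (if cs + xs[a] = (a:Int) - i + 1 then count + 1 else count)
      have hcast : ((a : Int) + 1) = ((a + 1 : Nat) : Int) := by push_cast; ring
      rw [hget]
      simp only at hrec ⊢
      rw [hcast, hrec, hdrop]
      simp only [pvRuns, List.count_cons]
      have harg : cs + xs[a] - (((a + 1 : Nat) : Int) - i) = cs - ((a:Int) - i) + xs[a] - 1 := by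
        push_cast; ring
      rw [harg]
      by_cases hc : cs - ((a : Int) - i) + xs[a] - 1 = 0
      · rw [if_pos (by omega : cs + xs[a] = (a : Int) - i + 1),
          if_pos (show (cs - ((a : Int) - i) + xs[a] - 1 == 0) = true by simp [hc])]
        push_cast
        ring
      · rw [if_neg (by omega : ¬ (cs + xs[a] = (a : Int) - i + 1)),
          if_neg (show ¬ ((cs - ((a : Int) - i) + xs[a] - 1 == 0) = true) by
            simp only [beq_iff_eq]; omega)]
        push_cast
        ring

-- outer loop of A, started at index a
lemma a_outer (xs : List Int) : ∀ (k : Nat) (a : Nat), xs.length - a = k → a ≤ xs.length →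
    ∀ (count : Int),
    (PySem.List.pyRange (a : Int) (xs.length : Int) 1).foldl
      (fun count i =>
        ((PySem.List.pyRange i (xs.length : Int) 1).foldl
          (fun (st : Int × Int) j =>
            let current_sum := st.1 + PySem.List.pyGetD xs j 0
            (current_sum, if current_sum = j - i + 1 then st.2 + 1 else st.2))
          (0, count)).2)
      count
      = count + pvAsum (xs.drop a) := by
  intro k
  induction k with
  | zero =>
      intro a hk ha count
      have hae : a = xs.length := by omega
      subst hae
      rw [PySem.List.pyRange_one_eq_nil (by omega)]
      simp [pvAsum, List.drop_length]
  | succ m ih =>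
      intro a hk ha count
      have halt : a < xs.length := by omega
      rw [PySem.List.pyRange_one_cons (by exact_mod_cast halt)]
      simp only [List.foldl_cons]
      have hin := a_inner xs (xs.length - a) a rfl (by omega) (a : Int) 0 count
      have harg : (0 : Int) - ((a:Int) - (a:Int)) = 0 := by ring
      rw [harg] at hin
      rw [hin]
      have hcast : ((a : Int) + 1) = ((a + 1 : Nat) : Int) := by push_cast; ring
      rw [hcast, ih (a + 1) (by omega) (by omega)]
      have hdrop : xs.drop a = xs[a] :: xs.drop (a + 1) := List.drop_eq_getElem_cons halt
      rw [hdrop]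
      simp only [pvAsum]
      rw [← hdrop]
      ring

lemma a_eq_asum (xs : List Int) : count_substr_equal_to_len xs = pvAsum xs := by
  unfold count_substr_equal_to_len
  have := a_outer xs xs.length 0 (by omega) (by omega) 0
  simpa using this

-- ===== VERDICT (by name: the statement is the Claim_ definition above) =====
theorem count_substr_equal_to_len_spec : Claim_equal_count_substr_equal_to_len := by
  intro xs _
  unfold Spec_count_substr_equal_to_len
  rw [a_eq_asum, alt_eq_pcount, pvAsum_eq_fpairs, ← pvPcount_eq_fpairs]
  simp [pvPcount]
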